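-- pv_equiv track=rewrite | github.com/Patdi/3DCNN | scripts/repair_voxel_manifest.py | _find_chain_residue_tokens
-- ===== SOURCE A (Python) =====
-- from typing import Dict, Iterable, List, Optional, Tuple
--
-- def _find_chain_residue_tokens(tokens: List[str]) -> Optional[Tuple[int, str, int, str]]:
--     """Return (chain_idx, chain_id, res_no, res_name) from right-oriented parse."""
--     for idx in range(len(tokens) - 3, -1, -1):
--         chain_tok = tokens[idx]
--         res_no_tok = tokens[idx + 1]
--         res_name_tok = tokens[idx + 2]
--         try:
--             res_no_val = int(res_no_tok)
--         except ValueError: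
--             continue
--         if not chain_tok:
--             continue
--         if not res_name_tok:
--             continue
--         return idx, chain_tok, res_no_val, res_name_tok
--     return None
-- ===== SOURCE B (Python) =====
-- def _find_chain_residue_tokens(tokens):
--     """Forward single pass over consecutive triples, keeping the last valid one."""
--     best = None
--     for idx, (chain_tok, res_no_tok, res_name_tok) in enumerate(
--             zip(tokens, tokens[1:], tokens[2:])):
--         try:
--             res_no_val = int(res_no_tok)
--         except ValueError:
--             continue
--         if chain_tok and res_name_tok:
--             best = (idx, chain_tok, res_no_val, res_name_tok)
--     return best
-- ===== Notes on version B (the rewrite author's own statement) =====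
-- stated objective: alternative
-- what changed: Replaces the reverse index loop with early return by a forward single pass over zip-built consecutive triples that keeps the last valid match in an accumulator.
import Mathlib
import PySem

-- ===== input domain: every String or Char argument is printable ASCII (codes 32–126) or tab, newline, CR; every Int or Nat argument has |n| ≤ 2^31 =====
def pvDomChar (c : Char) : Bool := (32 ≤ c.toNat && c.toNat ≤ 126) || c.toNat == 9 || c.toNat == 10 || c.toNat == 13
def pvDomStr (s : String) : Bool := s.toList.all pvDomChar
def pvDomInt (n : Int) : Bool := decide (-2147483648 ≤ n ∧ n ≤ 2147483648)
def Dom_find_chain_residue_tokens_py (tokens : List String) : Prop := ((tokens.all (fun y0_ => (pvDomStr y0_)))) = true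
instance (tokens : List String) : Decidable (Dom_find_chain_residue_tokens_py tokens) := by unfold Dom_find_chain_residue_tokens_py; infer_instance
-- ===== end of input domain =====

-- B replaces A's reverse index loop with early return by a forward pass over zip-built
-- consecutive triples keeping the last valid match (objective: alternative decomposition).

-- ===== PORT A =====
-- A's loop body over the descending index list; `none` in the catch-all = IndexError
-- (unreachable: every index produced by the range is in bounds).
def pvLoopA (tokens : List String) : List Int → Option (Int × String × Int × String)
  | [] => none
  | idx :: rest =>
    match PySem.List.pyGet? tokens idx, PySem.List.pyGet? tokens (idx + 1),
          PySem.List.pyGet? tokens (idx + 2) with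
    | some chain_tok, some res_no_tok, some res_name_tok =>
      match PySem.Int.ofStr? res_no_tok with
      | none => pvLoopA tokens rest
      | some res_no_val =>
        if chain_tok = "" then pvLoopA tokens rest
        else if res_name_tok = "" then pvLoopA tokens rest
        else some (idx, chain_tok, res_no_val, res_name_tok)
    | _, _, _ => none

def find_chain_residue_tokens_py (tokens : List String) : Option (Int × String × Int × String) :=
  pvLoopA tokens (PySem.List.pyRange ((tokens.length : Int) - 3) (-1) (-1))

-- ===== PORT B =====
def find_chain_residue_tokens_py_alt (tokens : List String) : Option (Int × String × Int × String) :=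
  let triples := tokens.zip ((PySem.List.slice tokens (some 1) none).zip
                             (PySem.List.slice tokens (some 2) none))
  (PySem.List.enumerate triples).foldl
    (fun best p =>
      match p with
      | (idx, chain_tok, res_no_tok, res_name_tok) =>
        match PySem.Int.ofStr? res_no_tok with
        | none => best
        | some res_no_val =>
          if chain_tok ≠ "" ∧ res_name_tok ≠ "" then
            some (idx, chain_tok, res_no_val, res_name_tok)
          else best)
    none

-- ===== PRECONDITION & SPEC =====
def Spec_find_chain_residue_tokens_py (tokens : List String) (out : Option (Int × String × Int × String)) : Prop := out = find_chain_residue_tokens_py_alt tokens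
instance (tokens : List String) (out : Option (Int × String × Int × String)) : Decidable (Spec_find_chain_residue_tokens_py tokens out) := by unfold Spec_find_chain_residue_tokens_py; infer_instance

-- ===== CLAIM (what is proved, stated in full; the proofs are below) =====
def Claim_equal_find_chain_residue_tokens_py : Prop := ∀ (tokens : List String), Dom_find_chain_residue_tokens_py tokens → Spec_find_chain_residue_tokens_py tokens (find_chain_residue_tokens_py tokens)

-- ===== LEMMAS AND PROOFS =====

-- The per-index check of A, as an Option-valued function (proof-side only).
def pvG (tokens : List String) (idx : Int) : Option (Int × String × Int × String) :=
  match PySem.List.pyGet? tokens idx, PySem.List.pyGet? tokens (idx + 1),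
        PySem.List.pyGet? tokens (idx + 2) with
  | some c, some r, some m =>
    (match PySem.Int.ofStr? r with
     | none => none
     | some v => if c = "" then none else if m = "" then none else some (idx, c, v, m))
  | _, _, _ => none

-- The per-triple check of B, as an Option-valued function (proof-side only).
def pvH (p : Int × String × String × String) : Option (Int × String × Int × String) :=
  match PySem.Int.ofStr? p.2.2.1 with
  | none => none
  | some v => if p.2.1 ≠ "" ∧ p.2.2.2 ≠ "" then some (p.1, p.2.1, v, p.2.2.2) else none

def pvTriples (tokens : List String) : List (String × String × String) :=
  tokens.zip ((tokens.drop 1).zip (tokens.drop 2))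

lemma pvLoopA_step (tokens : List String) (idx : Int) (rest : List Int)
    (h0 : 0 ≤ idx) (h2 : idx + 2 < (tokens.length : Int)) :
    pvLoopA tokens (idx :: rest) =
      match pvG tokens idx with
      | some y => some y
      | none => pvLoopA tokens rest := by
  obtain ⟨k, rfl⟩ := Int.eq_ofNat_of_zero_le h0
  have hk2 : k + 2 < tokens.length := by exact_mod_cast h2
  have e0 : PySem.List.pyGet? tokens (k : Int) = some (tokens[k]'(by omega)) := by
    rw [PySem.List.pyGet?_natCast]; exact List.getElem?_eq_getElem (by omega)
  have e1 : PySem.List.pyGet? tokens ((k : Int) + 1) = some (tokens[k+1]'(by omega)) := by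
    rw [show ((k : Int) + 1) = ((k + 1 : Nat) : Int) from by push_cast; ring,
        PySem.List.pyGet?_natCast]
    exact List.getElem?_eq_getElem (by omega)
  have e2 : PySem.List.pyGet? tokens ((k : Int) + 2) = some (tokens[k+2]'(by omega)) := by
    rw [show ((k : Int) + 2) = ((k + 2 : Nat) : Int) from by push_cast; ring,
        PySem.List.pyGet?_natCast]
    exact List.getElem?_eq_getElem (by omega)
  simp only [pvLoopA, pvG, e0, e1, e2]
  cases PySem.Int.ofStr? (tokens[k+1]'(by omega)) with
  | none => rfl
  | some v =>
    by_cases h1 : (tokens[k]'(by omega)) = "" <;>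
      by_cases h2 : (tokens[k+2]'(by omega)) = "" <;>
      simp [h1, h2]

lemma pvLoopA_eq_findSome (tokens : List String) (L : List Int)
    (h : ∀ idx ∈ L, 0 ≤ idx ∧ idx + 2 < (tokens.length : Int)) :
    pvLoopA tokens L = L.findSome? (pvG tokens) := by
  induction L with
  | nil => rfl
  | cons a L ih =>
    have ha := h a (by simp)
    rw [pvLoopA_step tokens a L ha.1 ha.2, List.findSome?_cons,
        ih (fun i hi => h i (by simp [hi]))]
    cases pvG tokens a <;> rfl

lemma pvFoldl_keepLast {α β : Type} (h : α → Option β) (l : List α) (init : Option β) :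
    l.foldl (fun b x => (h x).or b) init = (l.reverse.findSome? h).or init := by
  induction l generalizing init with
  | nil => simp
  | cons a l ih =>
    rw [List.foldl_cons, ih, List.reverse_cons, List.findSome?_append]
    cases hh : h a <;> cases e : l.reverse.findSome? h <;>
      simp [List.findSome?, hh]

lemma pvEnumerate_append_singleton {α : Type} (xs : List α) (x : α) (s : Int) :
    PySem.List.enumerate (xs ++ [x]) s
      = PySem.List.enumerate xs s ++ [(s + (xs.length : Int), x)] := by
  induction xs generalizing s with
  | nil => simp [PySem.List.enumerate_cons, PySem.List.enumerate]
  | cons a xs ih =>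
    simp only [List.cons_append, PySem.List.enumerate_cons, ih, List.length_cons]
    have : s + 1 + (xs.length : Int) = s + ((xs.length : Nat) + 1 : Nat) := by push_cast; ring
    rw [this]

lemma pvTriples_length (tokens : List String) :
    (pvTriples tokens).length = tokens.length - 2 := by
  simp [pvTriples]; omega

lemma pvG_eq_pvH (tokens : List String) (k : Nat) (hk : k + 2 < tokens.length) :
    pvG tokens (k : Int)
      = pvH ((k : Int), (pvTriples tokens)[k]'(by rw [pvTriples_length]; omega)) := by
  have e0 : PySem.List.pyGet? tokens (k : Int) = some (tokens[k]'(by omega)) := by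
    rw [PySem.List.pyGet?_natCast]; exact List.getElem?_eq_getElem (by omega)
  have e1 : PySem.List.pyGet? tokens ((k : Int) + 1) = some (tokens[k+1]'(by omega)) := by
    rw [show ((k : Int) + 1) = ((k + 1 : Nat) : Int) from by push_cast; ring,
        PySem.List.pyGet?_natCast]
    exact List.getElem?_eq_getElem (by omega)
  have e2 : PySem.List.pyGet? tokens ((k : Int) + 2) = some (tokens[k+2]'(by omega)) := by
    rw [show ((k : Int) + 2) = ((k + 2 : Nat) : Int) from by push_cast; ring,
        PySem.List.pyGet?_natCast]
    exact List.getElem?_eq_getElem (by omega)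
  have ht : (pvTriples tokens)[k]'(by rw [pvTriples_length]; omega)
      = (tokens[k]'(by omega), tokens[k+1]'(by omega), tokens[k+2]'(by omega)) := by
    simp [pvTriples, List.getElem_zip, List.getElem_drop, Nat.add_comm]
  rw [ht]
  simp only [pvG, pvH, e0, e1, e2]
  cases PySem.Int.ofStr? (tokens[k+1]'(by omega)) with
  | none => rfl
  | some v =>
    by_cases hc : tokens[k]'(by omega) = "" <;>
      by_cases hm : tokens[k+2]'(by omega) = "" <;>
      simp [hc, hm]

lemma pvKey (tokens : List String) (m : Nat) (hm : m ≤ (pvTriples tokens).length) :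
    ((PySem.List.pyRange 0 (m : Int) 1).reverse).findSome? (pvG tokens)
      = ((PySem.List.enumerate ((pvTriples tokens).take m)).reverse).findSome? pvH := by
  induction m with
  | zero => simp [PySem.List.pyRange_one_eq_nil]
  | succ m ih =>
    have hm' : m ≤ (pvTriples tokens).length := by omega
    have hmt : m < (pvTriples tokens).length := by omega
    have h1 : ((m + 1 : Nat) : Int) = (m : Int) + 1 := by push_cast; ring
    have h2 : ((pvTriples tokens).take m).length = m := by
      rw [List.length_take]; omega
    rw [h1, PySem.List.pyRange_one_succ_right (by positivity : (0:Int) ≤ (m:Int)),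
        List.take_add_one, List.getElem?_eq_getElem hmt, Option.toList_some,
        pvEnumerate_append_singleton, h2]
    rw [List.reverse_append, List.reverse_append]
    simp only [List.reverse_cons, List.reverse_nil, List.nil_append, List.singleton_append,
      List.findSome?_cons]
    have hk2 : m + 2 < tokens.length := by
      have := pvTriples_length tokens; omega
    rw [show (0 : Int) + (m : Int) = (m : Int) by ring] at *
    rw [pvG_eq_pvH tokens m hk2]
    cases pvH ((m : Int), (pvTriples tokens)[m]'(by omega)) with
    | none => exact ih hm'
    | some y => rfl

-- ===== VERDICT (by name: the statement is the Claim_ definition above) =====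
theorem find_chain_residue_tokens_py_spec : Claim_equal_find_chain_residue_tokens_py := by
  intro tokens _
  unfold Spec_find_chain_residue_tokens_py
  simp only [find_chain_residue_tokens_py, find_chain_residue_tokens_py_alt]
  -- B side: slices are drops, the fold keeps the last valid triple
  rw [PySem.List.slice_from tokens (by norm_num : (0:Int) ≤ 1),
      PySem.List.slice_from tokens (by norm_num : (0:Int) ≤ 2)]
  have hb : tokens.zip ((tokens.drop (1:Int).toNat).zip (tokens.drop (2:Int).toNat))
      = pvTriples tokens := by
    simp [pvTriples]
  rw [hb]
  have hbody : (fun (best : Option (Int × String × Int × String))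
        (p : Int × String × String × String) =>
      match p with
      | (idx, chain_tok, res_no_tok, res_name_tok) =>
        match PySem.Int.ofStr? res_no_tok with
        | none => best
        | some res_no_val =>
          if chain_tok ≠ "" ∧ res_name_tok ≠ "" then
            some (idx, chain_tok, res_no_val, res_name_tok)
          else best)
      = (fun b x => (pvH x).or b) := by
    funext b p
    obtain ⟨i, c, r, m⟩ := p
    simp only [pvH]
    cases PySem.Int.ofStr? r with
    | none => rfl
    | some v => by_cases h : c ≠ "" ∧ m ≠ "" <;> simp [h, Option.or]
  rw [hbody, pvFoldl_keepLast, Option.or_none]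
  -- A side: the countdown range is the reverse of the ascending range
  rw [PySem.List.pyRange_neg_one_eq_reverse]
  rw [show (-1 : Int) + 1 = 0 from by ring,
      show (tokens.length : Int) - 3 + 1 = (tokens.length : Int) - 2 from by ring]
  have hM : ((tokens.length : Int) - 2).toNat = (pvTriples tokens).length := by
    rw [pvTriples_length]; omega
  have hL : PySem.List.pyRange 0 ((tokens.length : Int) - 2) 1
      = PySem.List.pyRange 0 (((pvTriples tokens).length : Nat) : Int) 1 := by
    rw [PySem.List.pyRange_one, PySem.List.pyRange_one]
    simp [hM]
  rw [hL]
  rw [pvLoopA_eq_findSome]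
  · rw [pvKey tokens (pvTriples tokens).length (le_refl _), List.take_length]
  · intro idx hidx
    rw [List.mem_reverse, PySem.List.mem_pyRange_one] at hidx
    have := pvTriples_length tokens
    omega
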